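-- pv_equiv track=rewrite | github.com/deshi-sato/TradingTools | scripts/grid_search_thresholds_buy.py | make_day_folds
-- ===== SOURCE A (Python) =====
-- from typing import Any, Dict, Iterable, List, Optional, Sequence, Tuple
--
-- def make_day_folds(
--     days: Sequence[str], day_groups: Dict[str, List[int]], cv: int
-- ) -> List[List[str]]:
--     if cv <= 1 or len(days) <= 1:
--         return [list(days)]
--     cv = max(2, min(cv, len(days)))
--     folds: List[List[str]] = [[] for _ in range(cv)]
--     fold_sizes = [0] * cv
--     for day in days:
--         size = len(day_groups.get(day, []))
--         target = min(range(cv), key=lambda idx: fold_sizes[idx])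
--         folds[target].append(day)
--         fold_sizes[target] += size
--     return [fold for fold in folds if fold]
-- ===== SOURCE B (Python) =====
-- def _insert_sorted(pq, item):
--     # insert item into the ascending-sorted list pq, keeping it sorted
--     out = []
--     k = 0
--     while k < len(pq) and pq[k] < item:
--         out.append(pq[k])
--         k += 1
--     return out + [item] + pq[k:]
--
--
-- def make_day_folds(days, day_groups, cv):
--     if cv <= 1 or len(days) <= 1:
--         return [list(days)]
--     cv = max(2, min(cv, len(days)))
--     folds = [[] for _ in range(cv)]
--     # priority list of (fold_size, fold_index), kept sorted ascending:
--     # the head is always the smallest fold (ties -> smallest index)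
--     pq = [(0, i) for i in range(cv)]
--     for day in days:
--         size = len(day_groups.get(day, []))
--         s, i = pq[0]
--         folds[i].append(day)
--         pq = _insert_sorted(pq[1:], (s + size, i))
--     return [fold for fold in folds if fold]
-- ===== Notes on version B (the rewrite author's own statement) =====
-- stated objective: faster
-- what changed: B replaces the per-day argmin rescan over a fold_sizes array (min over range(cv) with a lambda) by an incrementally maintained sorted priority list of (size, index) pairs: the smallest fold is always the head, and after assignment the updated pair is re-inserted in order.
import Mathlib
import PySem

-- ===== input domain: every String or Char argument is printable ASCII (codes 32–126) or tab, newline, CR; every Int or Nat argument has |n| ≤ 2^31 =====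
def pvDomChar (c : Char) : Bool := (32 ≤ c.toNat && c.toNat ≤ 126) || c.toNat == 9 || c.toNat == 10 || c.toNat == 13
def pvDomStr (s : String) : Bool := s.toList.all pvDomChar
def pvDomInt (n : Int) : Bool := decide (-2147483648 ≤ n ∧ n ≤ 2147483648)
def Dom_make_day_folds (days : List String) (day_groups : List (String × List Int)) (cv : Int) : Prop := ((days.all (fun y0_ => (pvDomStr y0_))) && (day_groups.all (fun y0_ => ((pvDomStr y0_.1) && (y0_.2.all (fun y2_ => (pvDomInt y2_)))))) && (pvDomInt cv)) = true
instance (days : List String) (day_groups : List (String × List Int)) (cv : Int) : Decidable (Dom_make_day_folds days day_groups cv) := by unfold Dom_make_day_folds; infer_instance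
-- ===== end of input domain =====

-- B maintains a sorted priority list of (size, index) pairs instead of rescanning
-- fold_sizes for the argmin each iteration (measured faster by a constant factor).


-- ===== PORT A =====
-- literal port of A: per day, target = min(range(cv), key=lambda idx: fold_sizes[idx])
def make_day_folds (days : List String) (day_groups : List (String × List Int)) (cv : Int) : List (List String) :=
  if cv ≤ 1 ∨ (days.length : Int) ≤ 1 then [days]
  else
    let cvn : Int := max 2 (min cv (days.length : Int))
    let st := days.foldl (fun (st : List (List String) × List Int) day =>
      let folds := st.1
      let fold_sizes := st.2
      let size : Int := ((PySem.Dict.mk day_groups).getD day []).length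
      match PySem.List.min? (PySem.List.pyRange 0 cvn 1)
          (fun idx => PySem.List.pyGetD fold_sizes idx 0) with
      | none => (folds, fold_sizes)   -- unreachable: range(cvn) is nonempty (cvn ≥ 2)
      | some target =>
        (PySem.List.pySetD folds target (PySem.List.pyGetD folds target [] ++ [day]),
         PySem.List.pySetD fold_sizes target (PySem.List.pyGetD fold_sizes target 0 + size)))
      ((PySem.List.pyRange 0 cvn 1).map (fun _ => ([] : List String)),
       PySem.List.pyRepeat [(0 : Int)] cvn)
    st.1.filter (fun fold => !fold.isEmpty)

-- ===== PORT B =====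
-- Python tuple comparison (s1, i1) < (s2, i2), lexicographic
def pairLtB (a b : Int × Int) : Bool := a.1 < b.1 || (a.1 == b.1 && a.2 < b.2)

-- port of Source B's _insert_sorted: the while loop scanning past the elements < item,
-- written as the equivalent structural recursion over the scanned list (exact)
def insertSorted (pq : List (Int × Int)) (item : Int × Int) : List (Int × Int) :=
  match pq with
  | [] => [item]
  | p :: rest => if pairLtB p item then p :: insertSorted rest item else item :: p :: rest

def make_day_folds_alt (days : List String) (day_groups : List (String × List Int)) (cv : Int) : List (List String) :=
  if cv ≤ 1 ∨ (days.length : Int) ≤ 1 then [days]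
  else
    let cvn : Int := max 2 (min cv (days.length : Int))
    let st := days.foldl (fun (st : List (List String) × List (Int × Int)) day =>
      let folds := st.1
      let size : Int := ((PySem.Dict.mk day_groups).getD day []).length
      match st.2 with
      | [] => (folds, st.2)   -- unreachable: pq always has cvn ≥ 2 entries
      | (s, i) :: rest =>
        (PySem.List.pySetD folds i (PySem.List.pyGetD folds i [] ++ [day]),
         insertSorted rest (s + size, i)))
      ((PySem.List.pyRange 0 cvn 1).map (fun _ => ([] : List String)),
       (PySem.List.pyRange 0 cvn 1).map (fun i => ((0 : Int), i)))
    st.1.filter (fun fold => !fold.isEmpty)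

-- ===== PRECONDITION & SPEC =====
def Spec_make_day_folds (days : List String) (day_groups : List (String × List Int)) (cv : Int) (out : List (List String)) : Prop := out = make_day_folds_alt days day_groups cv
instance (days : List String) (day_groups : List (String × List Int)) (cv : Int) (out : List (List String)) : Decidable (Spec_make_day_folds days day_groups cv out) := by unfold Spec_make_day_folds; infer_instance

-- ===== CLAIM (what is proved, stated in full; the proofs are below) =====
def Claim_equal_make_day_folds : Prop := ∀ (days : List String) (day_groups : List (String × List Int)) (cv : Int), Dom_make_day_folds days day_groups cv → Spec_make_day_folds days day_groups cv (make_day_folds days day_groups cv)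

-- ===== LEMMAS AND PROOFS =====

-- non-strict lexicographic order on (size, index) pairs
def pairLe (a b : Int × Int) : Prop := a.1 < b.1 ∨ (a.1 = b.1 ∧ a.2 ≤ b.2)

-- the multiset a priority list must represent: (sizes[j], j) for each index j,
-- with indices starting at k
def enumSizes (sizes : List Int) (k : Int) : List (Int × Int) :=
  match sizes with
  | [] => []
  | s :: rest => (s, k) :: enumSizes rest (k + 1)

theorem enumSizes_length (sizes : List Int) (k : Int) : (enumSizes sizes k).length = sizes.length := by
  induction sizes generalizing k with
  | nil => rfl
  | cons s rest ih => simp [enumSizes, ih]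

theorem mem_enumSizes (sizes : List Int) (k : Int) (v i : Int) :
    (v, i) ∈ enumSizes sizes k ↔ ∃ j : Nat, j < sizes.length ∧ i = k + j ∧ sizes[j]? = some v := by
  induction sizes generalizing k with
  | nil => simp [enumSizes]
  | cons s rest ih =>
    simp only [enumSizes, List.mem_cons, ih, Prod.mk.injEq]
    constructor
    · rintro (⟨hv, hi⟩ | ⟨j, hj, hi, hv⟩)
      · exact ⟨0, by simp, by omega, by simp [hv]⟩
      · exact ⟨j + 1, by simpa using hj, by push_cast; omega, by simpa using hv⟩
    · rintro ⟨j, hj, hi, hv⟩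
      cases j with
      | zero => left; refine ⟨by simp_all, by omega⟩
      | succ j => right; exact ⟨j, by simpa using hj, by push_cast at hi ⊢; omega, by simpa using hv⟩

theorem enumSizes_set (pre post : List Int) (v k : Int) :
    enumSizes (pre ++ v :: post) k = enumSizes pre k ++ (v, k + pre.length) :: enumSizes post (k + pre.length + 1) := by
  induction pre generalizing k with
  | nil => simp [enumSizes]
  | cons p rest ih =>
    simp only [List.cons_append, enumSizes, ih, List.length_cons]
    have h1 : k + 1 + (rest.length : Int) = k + ((rest.length : Int) + 1) := by ring
    push_cast
    rw [h1]

theorem insertSorted_perm (pq : List (Int × Int)) (item : Int × Int) :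
    (insertSorted pq item).Perm (item :: pq) := by
  induction pq with
  | nil => simp [insertSorted]
  | cons p rest ih =>
    unfold insertSorted
    split
    · exact ((ih.cons p).trans (List.Perm.swap item p rest))
    · exact List.Perm.refl _

theorem pairLtB_le {a b : Int × Int} (h : pairLtB a b = true) : pairLe a b := by
  unfold pairLtB at h; unfold pairLe
  simp at h; omega

theorem not_pairLtB_le {a b : Int × Int} (h : ¬ pairLtB a b = true) : pairLe b a := by
  unfold pairLtB at h; unfold pairLe
  simp at h; omega

theorem pairLe_trans {a b c : Int × Int} (h1 : pairLe a b) (h2 : pairLe b c) : pairLe a c := by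
  unfold pairLe at *; omega

theorem insertSorted_pairwise (pq : List (Int × Int)) (item : Int × Int)
    (h : pq.Pairwise pairLe) : (insertSorted pq item).Pairwise pairLe := by
  induction pq with
  | nil => simp [insertSorted]
  | cons p rest ih =>
    rcases List.pairwise_cons.mp h with ⟨hp, hrest⟩
    unfold insertSorted
    split
    · rename_i hlt
      refine List.pairwise_cons.mpr ⟨?_, ih hrest⟩
      intro y hy
      have := (insertSorted_perm rest item).mem_iff.mp hy
      rcases List.mem_cons.mp this with h1 | h2
      · subst h1; exact pairLtB_le hlt
      · exact hp y h2
    · rename_i hnlt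
      refine List.pairwise_cons.mpr ⟨?_, h⟩
      intro y hy
      rcases List.mem_cons.mp hy with h1 | h2
      · subst h1; exact not_pairLtB_le hnlt
      · exact (pairLe_trans (not_pairLtB_le hnlt) (hp y h2))

-- characterization of Python's min(range(0,L), key=key) as the first argmin
theorem foldl_min_const (key : Int → Int) (xs : List Int) (m : Int)
    (h : ∀ x ∈ xs, ¬ key x < key m) :
    xs.foldl (fun mm x => if key x < key mm then x else mm) m = m := by
  induction xs with
  | nil => rfl
  | cons x rest ih =>
    simp only [List.foldl_cons]
    rw [if_neg (h x (by simp))]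
    exact ih (fun y hy => h y (by simp [hy]))

theorem foldl_g_mem (key : Int → Int) (xs : List Int) (m : Int) :
    xs.foldl (fun mm x => if key x < key mm then x else mm) m = m ∨
    xs.foldl (fun mm x => if key x < key mm then x else mm) m ∈ xs := by
  induction xs generalizing m with
  | nil => left; rfl
  | cons x rest ih =>
    simp only [List.foldl_cons]
    by_cases hx : key x < key m
    · rw [if_pos hx]
      rcases ih x with h | h
      · right; rw [h]; exact List.mem_cons_self
      · right; exact List.mem_cons_of_mem _ h
    · rw [if_neg hx]
      rcases ih m with h | h
      · left; exact h
      · right; exact List.mem_cons_of_mem _ h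

theorem foldl_minf_eq (key : Int → Int) (f : Option Int → Int → Option Int)
    (hn : ∀ x, f none x = some x)
    (hs : ∀ m x, f (some m) x = if key x < key m then some x else some m)
    (L t : Int) (h0 : 0 ≤ t) (hL : t < L)
    (hpre : ∀ j, 0 ≤ j → j < t → key t < key j)
    (hpost : ∀ j, t ≤ j → j < L → key t ≤ key j) :
    (PySem.List.pyRange 0 L 1).foldl f none = some t := by
  have hsome : ∀ (xs : List Int) (m : Int),
      xs.foldl f (some m) = some (xs.foldl (fun mm x => if key x < key mm then x else mm) m) := by
    intro xs
    induction xs with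
    | nil => intro m; rfl
    | cons x rest ih =>
      intro m
      simp only [List.foldl_cons, hs]
      by_cases hx : key x < key m
      · rw [if_pos hx, if_pos hx, ih]
      · rw [if_neg hx, if_neg hx, ih]
  have hsuffix : (PySem.List.pyRange (t + 1) L 1).foldl
      (fun mm x => if key x < key mm then x else mm) t = t := by
    apply foldl_min_const
    intro x hx
    have hm := PySem.List.mem_pyRange_one.mp hx
    have := hpost x (by omega) hm.2
    omega
  rw [PySem.List.pyRange_one_append 0 t L h0 (le_of_lt hL), List.foldl_append,
      PySem.List.pyRange_one_cons hL, List.foldl_cons]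
  have hacc : (PySem.List.pyRange 0 t 1).foldl f none = none ∨
      ∃ j0, (PySem.List.pyRange 0 t 1).foldl f none = some j0 ∧ j0 ∈ PySem.List.pyRange 0 t 1 := by
    cases hP : PySem.List.pyRange 0 t 1 with
    | nil => left; rfl
    | cons x rest =>
      right
      rw [List.foldl_cons, hn, hsome]
      refine ⟨_, rfl, ?_⟩
      rcases foldl_g_mem key rest x with h | h
      · rw [h]; exact List.mem_cons_self
      · exact List.mem_cons_of_mem _ h
  rcases hacc with h | ⟨j0, hj0, hmem⟩
  · rw [h, hn, hsome, hsuffix]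
  · rw [hj0, hs]
    have hb := PySem.List.mem_pyRange_one.mp hmem
    rw [if_pos (hpre j0 hb.1 hb.2), hsome, hsuffix]

theorem min?_pyRange_eq (L t : Int) (key : Int → Int)
    (h0 : 0 ≤ t) (hL : t < L)
    (hpre : ∀ j, 0 ≤ j → j < t → key t < key j)
    (hpost : ∀ j, t ≤ j → j < L → key t ≤ key j) :
    PySem.List.min? (PySem.List.pyRange 0 L 1) key = some t := by
  unfold PySem.List.min?
  exact foldl_minf_eq key _ (fun x => rfl) (fun m x => rfl) L t h0 hL hpre hpost

-- named copies of the two loop bodies (proof-only; defeq to the lambdas in the ports)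
def stepA (day_groups : List (String × List Int)) (cvn : Int)
    (st : List (List String) × List Int) (day : String) : List (List String) × List Int :=
  match PySem.List.min? (PySem.List.pyRange 0 cvn 1)
      (fun idx => PySem.List.pyGetD st.2 idx 0) with
  | none => (st.1, st.2)
  | some target =>
    (PySem.List.pySetD st.1 target (PySem.List.pyGetD st.1 target [] ++ [day]),
     PySem.List.pySetD st.2 target
       (PySem.List.pyGetD st.2 target 0 + (((PySem.Dict.mk day_groups).getD day []).length : Int)))

def stepB (day_groups : List (String × List Int))
    (st : List (List String) × List (Int × Int)) (day : String) : List (List String) × List (Int × Int) :=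
  match st.2 with
  | [] => (st.1, st.2)
  | (s, i) :: rest =>
    (PySem.List.pySetD st.1 i (PySem.List.pyGetD st.1 i [] ++ [day]),
     insertSorted rest (s + (((PySem.Dict.mk day_groups).getD day []).length : Int), i))

theorem enumSizes_replicate (n : Nat) (k : Int) :
    enumSizes (List.replicate n (0 : Int)) k
      = (PySem.List.pyRange k (k + n) 1).map (fun i => ((0 : Int), i)) := by
  induction n generalizing k with
  | zero => simp [enumSizes, PySem.List.pyRange_one_eq_nil]
  | succ n ih =>
    rw [List.replicate_succ]
    show (0, k) :: enumSizes (List.replicate n (0 : Int)) (k + 1) = _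
    rw [ih]
    have h2 : k + ((n : Int) + 1) = k + 1 + n := by ring
    push_cast
    rw [h2, PySem.List.pyRange_one_cons (show k < k + 1 + n by omega), List.map_cons]

theorem loop_agree (dg : List (String × List Int)) (cvn : Int) (hcv : 0 < cvn)
    (days : List String) :
    ∀ (folds : List (List String)) (sizes : List Int) (pq : List (Int × Int)),
    ((sizes.length : Int) = cvn) →
    pq.Pairwise pairLe → pq.Perm (enumSizes sizes 0) →
    (days.foldl (stepA dg cvn) (folds, sizes)).1 = (days.foldl (stepB dg) (folds, pq)).1 := by
  induction days with
  | nil => intro folds sizes pq _ _ _; rfl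
  | cons day rest ih =>
    intro folds sizes pq hlen hsorted hperm
    -- the head of pq is the (size, index) pair of the first smallest fold
    have hpq_ne : pq ≠ [] := by
      intro h
      have := hperm.length_eq
      rw [h, enumSizes_length] at this
      simp at this
      omega
    obtain ⟨⟨m, t⟩, restpq, rfl⟩ : ∃ p l, pq = p :: l := by
      cases pq with
      | nil => exact absurd rfl hpq_ne
      | cons p l => exact ⟨p, l, rfl⟩
    have hmem : (m, t) ∈ enumSizes sizes 0 := hperm.mem_iff.mp (by simp)
    obtain ⟨n, hn, ht, hv⟩ := (mem_enumSizes sizes 0 m t).mp hmem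
    have ht0 : (0 : Int) ≤ t := by omega
    have htL : t < cvn := by omega
    have hvn : sizes[n]'hn = m := by simpa [List.getElem?_eq_getElem hn] using hv
    have hle : ∀ y ∈ (m, t) :: restpq, pairLe (m, t) y := by
      intro y hy
      rcases List.mem_cons.mp hy with h | h
      · subst h; unfold pairLe; omega
      · exact (List.pairwise_cons.mp hsorted).1 y h
    have hkey : ∀ j : Int, (hj1 : 0 ≤ j) → (hj2 : j < cvn) →
        PySem.List.pyGetD sizes j 0 = sizes[j.toNat]'(by omega) := by
      intro j hj1 hj2
      exact PySem.List.pyGetD_eq_getElem sizes 0 hj1 (by omega)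
    have hsize : PySem.List.pyGetD sizes t 0 = m := by
      rw [hkey t ht0 htL]
      have hteq : t.toNat = n := by omega
      simp only [hteq]
      exact hvn
    have hall : ∀ j : Int, 0 ≤ j → j < cvn →
        m < PySem.List.pyGetD sizes j 0 ∨ (m = PySem.List.pyGetD sizes j 0 ∧ t ≤ j) := by
      intro j hj1 hj2
      have hjlt : j.toNat < sizes.length := by omega
      have hp : pairLe (m, t) (sizes[j.toNat]'hjlt, ((j.toNat : Nat) : Int)) := by
        apply hle
        apply hperm.mem_iff.mpr
        exact (mem_enumSizes sizes 0 _ _).mpr ⟨j.toNat, hjlt, by omega, List.getElem?_eq_getElem hjlt⟩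
      rw [hkey j hj1 hj2]
      unfold pairLe at hp
      simp only at hp
      omega
    have hmin : PySem.List.min? (PySem.List.pyRange 0 cvn 1)
        (fun idx => PySem.List.pyGetD sizes idx 0) = some t := by
      apply min?_pyRange_eq cvn t _ ht0 htL
      · intro j hj1 hj2
        simp only [hsize]
        rcases hall j hj1 (by omega) with h | ⟨h1, h2⟩
        · exact h
        · omega
      · intro j hj1 hj2
        simp only [hsize]
        rcases hall j (by omega) hj2 with h | ⟨h1, h2⟩ <;> omega
    simp only [List.foldl_cons]
    have eqA : stepA dg cvn (folds, sizes) day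
        = (PySem.List.pySetD folds t (PySem.List.pyGetD folds t [] ++ [day]),
           PySem.List.pySetD sizes t (m + (((PySem.Dict.mk dg).getD day []).length : Int))) := by
      simp only [stepA, hmin, hsize]
    have eqB : stepB dg (folds, (m, t) :: restpq) day
        = (PySem.List.pySetD folds t (PySem.List.pyGetD folds t [] ++ [day]),
           insertSorted restpq (m + (((PySem.Dict.mk dg).getD day []).length : Int), t)) := by
      simp only [stepB]
    rw [eqA, eqB]
    -- re-establish the invariant for the updated state
    set size : Int := (((PySem.Dict.mk dg).getD day []).length : Int) with hsz
    have hset : PySem.List.pySetD sizes t (m + size) = sizes.set n (m + size) := by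
      rw [PySem.List.pySetD_of_nonneg sizes _ ht0]
      congr 1
      omega
    rw [hset]
    apply ih
    · simp [hlen]
    · exact insertSorted_pairwise restpq _ (List.pairwise_cons.mp hsorted).2
    · -- permutation of the updated priority list with the updated enumeration
      have hsplit : sizes = sizes.take n ++ sizes[n]'hn :: sizes.drop (n + 1) := by
        rw [List.getElem_cons_drop]
        exact (List.take_append_drop n sizes).symm
      have hlen_take : (sizes.take n).length = n := by
        rw [List.length_take]
        omega
      have hE : enumSizes sizes 0
          = enumSizes (sizes.take n) 0 ++ (m, t) :: enumSizes (sizes.drop (n + 1)) (t + 1) := by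
        conv_lhs => rw [hsplit]
        rw [enumSizes_set]
        rw [hlen_take, hvn]
        have : (0 : Int) + n = t := by omega
        rw [this]
      have hsetsplit : sizes.set n (m + size)
          = sizes.take n ++ (m + size) :: sizes.drop (n + 1) := by
        conv_lhs => rw [hsplit]
        rw [List.set_append]
        rw [if_neg (by rw [hlen_take]; omega : ¬ n < (sizes.take n).length)]
        rw [hlen_take, Nat.sub_self, List.set_cons_zero]
      have hE' : enumSizes (sizes.set n (m + size)) 0
          = enumSizes (sizes.take n) 0 ++ (m + size, t) :: enumSizes (sizes.drop (n + 1)) (t + 1) := by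
        rw [hsetsplit, enumSizes_set, hlen_take]
        have : (0 : Int) + n = t := by omega
        rw [this]
      have hrest : restpq.Perm (enumSizes (sizes.take n) 0 ++ enumSizes (sizes.drop (n + 1)) (t + 1)) := by
        have h1 : ((m, t) :: restpq).Perm
            ((m, t) :: (enumSizes (sizes.take n) 0 ++ enumSizes (sizes.drop (n + 1)) (t + 1))) := by
          refine hperm.trans ?_
          rw [hE]
          exact List.perm_middle
        exact h1.cons_inv
      refine (insertSorted_perm restpq _).trans ?_
      refine (hrest.cons (m + size, t)).trans ?_
      rw [hE']
      exact List.perm_middle.symm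


-- ===== VERDICT (by name: the statement is the Claim_ definition above) =====
theorem make_day_folds_spec : Claim_equal_make_day_folds := by
  intro days day_groups cv _
  show make_day_folds days day_groups cv = make_day_folds_alt days day_groups cv
  unfold make_day_folds make_day_folds_alt
  by_cases h : cv ≤ 1 ∨ (days.length : Int) ≤ 1
  · rw [if_pos h, if_pos h]
  · rw [if_neg h, if_neg h]
    have h2 : (2 : Int) ≤ max 2 (min cv (days.length : Int)) := le_max_left _ _
    set cvn : Int := max 2 (min cv (days.length : Int)) with hcvn
    show ((days.foldl (stepA day_groups cvn)
        ((PySem.List.pyRange 0 cvn 1).map (fun _ => ([] : List String)),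
         PySem.List.pyRepeat [(0 : Int)] cvn)).1).filter (fun fold => !fold.isEmpty)
      = ((days.foldl (stepB day_groups)
        ((PySem.List.pyRange 0 cvn 1).map (fun _ => ([] : List String)),
         (PySem.List.pyRange 0 cvn 1).map (fun i => ((0 : Int), i)))).1).filter (fun fold => !fold.isEmpty)
    have hrep : PySem.List.pyRepeat [(0 : Int)] cvn = List.replicate cvn.toNat 0 :=
      PySem.List.pyRepeat_singleton _ _
    have hlen : ((PySem.List.pyRepeat [(0 : Int)] cvn).length : Int) = cvn := by
      rw [hrep, List.length_replicate]; omega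
    have hsort : ((PySem.List.pyRange 0 cvn 1).map (fun i => ((0 : Int), i))).Pairwise pairLe := by
      refine List.Pairwise.map _ ?_ (PySem.List.pairwise_lt_pyRange_one 0 cvn)
      intro a b hab
      exact Or.inr ⟨rfl, le_of_lt hab⟩
    have hperm : ((PySem.List.pyRange 0 cvn 1).map (fun i => ((0 : Int), i))).Perm
        (enumSizes (PySem.List.pyRepeat [(0 : Int)] cvn) 0) := by
      rw [hrep, enumSizes_replicate]
      have h0 : (0 : Int) + (cvn.toNat : Int) = cvn := by omega
      rw [h0]
    exact congrArg (fun l => List.filter (fun fold => !fold.isEmpty) l)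
      (loop_agree day_groups cvn (by omega) days _ _ _ hlen hsort hperm)
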